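-- pv_equiv track=rewrite | github.com/Abdo404Khaled/LeetCode_Solutions | 1611-making-file-names-unique/making-file-names-unique.py | getFolderNames
-- ===== SOURCE A (Python) =====
-- def getFolderNames(names):
--     """
--     :type names: List[str]
--     :rtype: List[str]
--     """
--     words = {}
--     res = []
--     for name in names:
--         if name not in words:
--             words[name] = 1
--             res.append(name)
--         else:
--             k = words[name]
--             new_name = "{}({})".format(name, str(k))
--             while new_name in words:
--                 k += 1
--                 new_name = "{}({})".format(name, str(k))
--
--             words[new_name] = 1
--             words[name] = k + 1
--             res.append(new_name)
--
--     return res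
-- ===== SOURCE B (Python) =====
-- def getFolderNames(names):
--     """
--     :type names: List[str]
--     :rtype: List[str]
--     """
--     used = set()
--     res = []
--     for name in names:
--         for cand in [name] + ["{}({})".format(name, k) for k in range(1, len(used) + 2)]:
--             if cand not in used:
--                 break
--         used.add(cand)
--         res.append(cand)
--     return res
-- ===== Notes on version B (the rewrite author's own statement) =====
-- stated objective: alternative
-- what changed: Replaced A's counter-dict with cached resume indices and a while-loop by a single set of used names and, per input name, a first-free search over an explicitly built bounded candidate list [name, name(1), ..., name(len(used)+1)], folded over the input with a (set, output) pair.
import Mathlib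
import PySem

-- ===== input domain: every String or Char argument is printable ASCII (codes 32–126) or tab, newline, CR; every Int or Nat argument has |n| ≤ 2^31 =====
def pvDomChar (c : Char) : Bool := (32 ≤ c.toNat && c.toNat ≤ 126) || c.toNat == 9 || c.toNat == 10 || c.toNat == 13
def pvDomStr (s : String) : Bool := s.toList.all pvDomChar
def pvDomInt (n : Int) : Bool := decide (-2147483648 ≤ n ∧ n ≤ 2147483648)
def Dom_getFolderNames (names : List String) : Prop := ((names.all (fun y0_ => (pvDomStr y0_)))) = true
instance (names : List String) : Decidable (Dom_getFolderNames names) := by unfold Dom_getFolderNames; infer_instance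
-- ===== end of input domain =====

-- B drops A's counter-dict of resume indices: it keeps one set of used names and, for each
-- input name, picks the first free entry of the bounded candidate list
-- [name, name(1), ..., name(len(used)+1)]; same return value, no claim about speed.

-- ===== PORT A =====
-- "{}({})".format(name, k)
def pvFmt (name : String) (k : Int) : String := name ++ "(" ++ PySem.Int.toStr k ++ ")"

-- 'while new_name in words: k += 1; new_name = ...'; fuel only makes the loop total
-- (at call time the dict holds res.length keys, so res.length + 1 probes always suffice).
def pvWhileA (words : PySem.Dict String Int) (name : String) : Nat → Int → String → Int × String
  | 0, k, nn => (k, nn)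
  | fuel + 1, k, nn =>
    if words.contains nn then pvWhileA words name fuel (k + 1) (pvFmt name (k + 1))
    else (k, nn)

-- the 'for name in names' loop of A, carrying the dict 'words' and the output 'res'
def pvGoA : List String → PySem.Dict String Int → List String → List String
  | [], _, res => res
  | name :: rest, words, res =>
    if words.contains name = false then
      pvGoA rest (words.insert name 1) (res ++ [name])
    else
      -- k = words[name]; the key is present here, so getD's default is never used
      let k := words.getD name 0
      let r := pvWhileA words name (res.length + 1) k (pvFmt name k)
      pvGoA rest ((words.insert r.2 1).insert name (r.1 + 1)) (res ++ [r.2])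

def getFolderNames (names : List String) : List String := pvGoA names PySem.Dict.empty []

-- ===== PORT B =====
-- the inner 'for cand in [name] + [...] : if cand not in used: break'; after a full pass
-- without break the loop variable holds the last candidate, hence the getD fallback
-- (the candidate list is never empty, so 'cand' is always bound).
def pvCands (name : String) (m : Int) : List String :=
  name :: (PySem.List.pyRange 1 (m + 2) 1).map
    (fun k => name ++ "(" ++ PySem.Int.toStr k ++ ")")

def pvChoose (used : PySem.Set String) (name : String) : String :=
  ((pvCands name used.length).find? (fun c => !(PySem.Set.contains used c))).getD
    ((pvCands name used.length).getLastD name)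

-- the outer loop as a fold over the input, state = (used set, output list)
def getFolderNames_alt (names : List String) : List String :=
  (names.foldl (fun st name =>
      (PySem.Set.add st.1 (pvChoose st.1 name), st.2 ++ [pvChoose st.1 name]))
    ((PySem.Set.empty : PySem.Set String), ([] : List String))).2

-- ===== PRECONDITION & SPEC =====
def Spec_getFolderNames (names : List String) (out : List String) : Prop := out = getFolderNames_alt names
instance (names : List String) (out : List String) : Decidable (Spec_getFolderNames names out) := by unfold Spec_getFolderNames; infer_instance

-- ===== CLAIM (what is proved, stated in full; the proofs are below) =====
def Claim_equal_getFolderNames : Prop := ∀ (names : List String), Dom_getFolderNames names → Spec_getFolderNames names (getFolderNames names)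

-- ===== LEMMAS AND PROOFS =====

-- `str(n)` digits: recursive rendering of a Nat, used to characterise Nat.toDigits
def pvDigits (n : Nat) : List Char :=
  if _h : n < 10 then [Nat.digitChar n]
  else pvDigits (n / 10) ++ [Nat.digitChar (n % 10)]
decreasing_by exact Nat.div_lt_self (by omega) (by omega)

lemma pvToDigitsCore_eq : ∀ fuel n ds, n < fuel →
    Nat.toDigitsCore 10 fuel n ds = pvDigits n ++ ds := by
  intro fuel
  induction fuel with
  | zero => intro n ds h; omega
  | succ f ih =>
    intro n ds h
    simp only [Nat.toDigitsCore]
    by_cases h10 : n < 10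
    · have hz : n / 10 = 0 := Nat.div_eq_of_lt h10
      rw [pvDigits]
      simp [hz, h10, Nat.mod_eq_of_lt h10]
    · have hz : ¬ (n / 10 = 0) := by
        intro hc
        rcases Nat.div_eq_zero_iff.1 hc with h' | h' <;> omega
      rw [if_neg hz,
        ih (n / 10) _ (by have := Nat.div_lt_self (show 0 < n by omega) (show 1 < 10 by omega); omega)]
      conv_rhs => rw [pvDigits]
      simp [h10]

lemma pvDigits_decode (n : Nat) : ∀ a : Nat,
    List.foldl (fun acc c => acc * 10 + (c.toNat - 48)) a (pvDigits n)
      = a * 10 ^ (pvDigits n).length + n := by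
  induction n using pvDigits.induct with
  | case1 n h10 =>
    intro a
    rw [pvDigits]
    have hv : (Nat.digitChar n).toNat - 48 = n := by interval_cases n <;> decide
    simp [h10, hv]
  | case2 n h10 ih =>
    intro a
    rw [pvDigits]
    have hv : (Nat.digitChar (n % 10)).toNat - 48 = n % 10 := by
      have := Nat.mod_lt n (show 0 < 10 by omega)
      set m := n % 10
      interval_cases m <;> decide
    rw [dif_neg h10]
    simp only [List.foldl_append, List.foldl_cons, List.foldl_nil, List.length_append,
      List.length_cons, List.length_nil, ih, hv]
    rw [pow_succ, ← mul_assoc]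
    set X := a * 10 ^ (pvDigits (n / 10)).length with hX
    omega

lemma pvDigits_inj {m n : Nat} (h : pvDigits m = pvDigits n) : m = n := by
  have hm := pvDigits_decode m 0
  have hn := pvDigits_decode n 0
  rw [h] at hm
  omega

lemma pvToChars_inj {j j' : Int} (hj : 0 ≤ j) (hj' : 0 ≤ j')
    (h2 : PySem.Int.toChars j = PySem.Int.toChars j') : j = j' := by
  unfold PySem.Int.toChars at h2
  rw [if_neg (by omega), if_neg (by omega)] at h2
  unfold Nat.toDigits at h2
  rw [pvToDigitsCore_eq _ _ _ (by omega), pvToDigitsCore_eq _ _ _ (by omega)] at h2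
  simp at h2
  have := pvDigits_inj h2
  omega

lemma pvFmt_inj {name : String} {j j' : Int} (hj : 0 ≤ j) (hj' : 0 ≤ j')
    (h : pvFmt name j = pvFmt name j') : j = j' := by
  unfold pvFmt at h
  have h2 := congrArg String.toList h
  simp [String.toList_append] at h2
  exact pvToChars_inj hj hj' h2

lemma pvNodupSubsetLen {l l' : List String} (h : l.Nodup) (hs : l ⊆ l') : l.length ≤ l'.length := by
  calc l.length = l.toFinset.card := (List.toFinset_card_of_nodup h).symm
  _ ≤ l'.toFinset.card := Finset.card_le_card (fun x hx => List.mem_toFinset.2 (hs (List.mem_toFinset.1 hx)))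
  _ ≤ l'.length := l'.toFinset_card_le

lemma pvExistsFree (seen : PySem.Set String) (name : String) (m : Nat)
    (hlen : seen.length ≤ m) (k : Int) (hk : 1 ≤ k) :
    ∃ j : Int, k ≤ j ∧ j < k + ((m : Int) + 1) ∧ pvFmt name j ∉ seen := by
  by_contra hc
  push Not at hc
  have hsub : (List.range (m + 1)).map (fun i : Nat => pvFmt name (k + (i : Int))) ⊆ seen := by
    intro x hx
    obtain ⟨i, hi, rfl⟩ := List.mem_map.1 hx
    rw [List.mem_range] at hi
    exact hc _ (by omega) (by omega)
  have hnd : ((List.range (m + 1)).map (fun i : Nat => pvFmt name (k + (i : Int)))).Nodup := by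
    refine List.Nodup.map_on ?_ List.nodup_range
    intro i hi i' hi' he
    rw [List.mem_range] at hi hi'
    have := pvFmt_inj (by omega) (by omega) he
    omega
  have hle := pvNodupSubsetLen hnd hsub
  simp at hle
  omega

-- ghost counter loop used only in the proofs, to name the suffix both programs land on
def pvScan (seen : PySem.Set String) (name : String) : Nat → Int → Int
  | 0, k => k
  | fuel + 1, k =>
    if PySem.Set.contains seen (pvFmt name k) then pvScan seen name fuel (k + 1) else k

-- A's while-loop computes (pvScan …, pvFmt name (pvScan …)) when membership agrees
lemma pvWhile_eq (words : PySem.Dict String Int) (seen : PySem.Set String) (name : String)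
    (hc : ∀ s, words.contains s = PySem.Set.contains seen s) :
    ∀ fuel k, pvWhileA words name fuel k (pvFmt name k)
      = (pvScan seen name fuel k, pvFmt name (pvScan seen name fuel k)) := by
  intro fuel
  induction fuel with
  | zero => intro k; simp [pvWhileA, pvScan]
  | succ f ih =>
    intro k
    simp only [pvWhileA, pvScan, hc]
    by_cases h : pvFmt name k ∈ seen
    · simp [h, ih]
    · simp [h]

-- characterisation of the ghost loop, given a free slot within fuel
lemma pvScan_spec (seen : PySem.Set String) (name : String) :
    ∀ (fuel : Nat) (k : Int), (∃ j : Int, k ≤ j ∧ j < k + (fuel : Int) ∧ pvFmt name j ∉ seen) →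
      k ≤ pvScan seen name fuel k ∧ pvFmt name (pvScan seen name fuel k) ∉ seen ∧
        ∀ j : Int, k ≤ j → j < pvScan seen name fuel k → pvFmt name j ∈ seen := by
  intro fuel
  induction fuel with
  | zero =>
    intro k hex
    obtain ⟨j, h1, h2, _⟩ := hex
    exfalso; simp at h2; omega
  | succ f ih =>
    intro k hex
    obtain ⟨j, h1, h2, h3⟩ := hex
    simp only [pvScan]
    by_cases h : pvFmt name k ∈ seen
    · have hjk : j ≠ k := by rintro rfl; exact h3 h
      have := ih (k + 1) ⟨j, by omega, by push_cast at h2 ⊢; omega, h3⟩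
      simp only [h, PySem.Set.contains_iff, if_true]
      refine ⟨by omega, this.2.1, ?_⟩
      intro i hik hilt
      by_cases hik' : i = k
      · subst hik'; exact h
      · exact this.2.2 i (by omega) hilt
    · rw [if_neg (fun hh => h ((PySem.Set.contains_iff _ _).1 hh))]
      exact ⟨le_refl _, h, by intro i h1 h2; omega⟩

-- find? over an integer range returns the least element satisfying the predicate
lemma pvFind_range (q : Int → Bool) : ∀ (n : Nat) (lo K : Int), lo ≤ K → K < lo + (n : Int) →
    q K = true → (∀ j : Int, lo ≤ j → j < K → q j = false) →
    (PySem.List.pyRange lo (lo + (n : Int)) 1).find? q = some K := by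
  intro n
  induction n with
  | zero => intro lo K h1 h2 _ _; exfalso; simp at h2; omega
  | succ m ih =>
    intro lo K h1 h2 hq hbelow
    rw [PySem.List.pyRange_one_cons (by push_cast; omega)]
    by_cases hK : K = lo
    · subst hK
      rw [List.find?_cons_of_pos hq]
    · rw [List.find?_cons_of_neg (by simp [hbelow lo (le_refl _) (by omega)])]
      have := ih (lo + 1) K (by omega) (by push_cast at h2 ⊢; omega) hq
        (fun j a b => hbelow j (by omega) b)
      rw [show lo + 1 + (m : Int) = lo + ((m : Nat) + 1 : Nat) by push_cast; omega] at this
      exact this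

-- pvChoose picks the name itself when it is free
lemma pvChoose_free (used : PySem.Set String) (name : String) (h : name ∉ used) :
    pvChoose used name = name := by
  unfold pvChoose pvCands
  rw [List.find?_cons_of_pos (by simp [h])]
  rfl

-- pvChoose picks the least free suffix when the name is taken
lemma pvChoose_taken (used : PySem.Set String) (name : String) (K : Int)
    (hmem : name ∈ used) (hK1 : 1 ≤ K) (hK2 : K < (used.length : Int) + 2)
    (hfree : pvFmt name K ∉ used)
    (hbelow : ∀ j : Int, 1 ≤ j → j < K → pvFmt name j ∈ used) :
    pvChoose used name = pvFmt name K := by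
  unfold pvChoose pvCands
  rw [List.find?_cons_of_neg (by simp [hmem]),
    List.find?_map]
  have hq := pvFind_range (fun k => !(PySem.Set.contains used (pvFmt name k)))
    (used.length + 1) 1 K hK1 (by push_cast; omega)
    (by simp [hfree])
    (fun j a b => by simp; exact hbelow j a b)
  rw [show (1 : Int) + ((used.length + 1 : Nat) : Int) = (used.length : Int) + 2 by push_cast; omega] at hq
  have hcomp : ((fun c => !(PySem.Set.contains used c)) ∘
      (fun k : Int => name ++ "(" ++ PySem.Int.toStr k ++ ")"))
      = fun k => !(PySem.Set.contains used (pvFmt name k)) := rfl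
  rw [hcomp, hq]
  rfl

-- the loop invariant tying A's dict to B's set
def pvInv (words : PySem.Dict String Int) (seen : PySem.Set String) : Prop :=
  (∀ s : String, s ∈ words.keys ↔ s ∈ seen) ∧
  (∀ nm v, words.get? nm = some v → 1 ≤ v ∧
    ∀ j : Int, 1 ≤ j → j < v → pvFmt nm j ∈ seen)

lemma pvGo_eq : ∀ (rest : List String) words used res,
    pvInv words used → used.length ≤ res.length →
    pvGoA rest words res
      = (rest.foldl (fun st name =>
          (PySem.Set.add st.1 (pvChoose st.1 name), st.2 ++ [pvChoose st.1 name]))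
          (used, res)).2 := by
  intro rest
  induction rest with
  | nil => intro words used res _ _; rfl
  | cons name rest ih =>
    intro words used res hinv hlen
    obtain ⟨hkeys, hcnt⟩ := hinv
    have hcont : ∀ s, words.contains s = PySem.Set.contains used s := by
      intro s
      cases hA : words.contains s <;> cases hB : PySem.Set.contains used s <;> try rfl
      · have hm : s ∈ used := (PySem.Set.contains_iff _ _).1 hB
        have hc2 : words.contains s = true :=
          (PySem.Dict.contains_iff_mem_keys _ _).2 ((hkeys s).2 hm)
        rw [hA] at hc2; cases hc2
      · have hm : s ∈ words.keys := (PySem.Dict.contains_iff_mem_keys _ _).1 hA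
        have hc2 : PySem.Set.contains used s = true :=
          (PySem.Set.contains_iff _ _).2 ((hkeys s).1 hm)
        rw [hB] at hc2; cases hc2
    simp only [pvGoA, List.foldl_cons, hcont name]
    cases hb : PySem.Set.contains used name with
    | false =>
      have hname : name ∉ used := by
        intro hm
        rw [(PySem.Set.contains_iff _ _).2 hm] at hb
        cases hb
      rw [if_pos rfl, pvChoose_free used name hname]
      apply ih
      · constructor
        · intro s
          rw [PySem.Dict.mem_keys_insert, PySem.Set.mem_add, hkeys s]
          tauto
        · intro nm v hv
          rw [PySem.Dict.get?_insert] at hv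
          by_cases hnm : nm = name
          · rw [if_pos hnm] at hv
            injection hv with hv
            exact ⟨by omega, fun j a b => by omega⟩
          · rw [if_neg hnm] at hv
            obtain ⟨h1, h2⟩ := hcnt nm v hv
            exact ⟨h1, fun j a b => (PySem.Set.mem_add _ _ _).2 (Or.inl (h2 j a b))⟩
      · have : PySem.Set.add used name = used ++ [name] := by
          simp [PySem.Set.add]
          exact hname
        rw [this]
        simp
        omega
    | true =>
      have hname : name ∈ used := (PySem.Set.contains_iff _ _).1 hb
      have hkmem : name ∈ words.keys := (hkeys name).2 hname
      obtain ⟨v, hv⟩ : ∃ v, words.get? name = some v := by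
        cases hgv : words.get? name with
        | none => exact absurd ((PySem.Dict.get?_eq_none_iff_not_mem_keys _ _).1 hgv) (by simp [hkmem])
        | some v => exact ⟨v, rfl⟩
      have hgD : words.getD name 0 = v := by
        rw [PySem.Dict.getD_eq_get?_getD, hv]; rfl
      obtain ⟨hv1, hvocc⟩ := hcnt name v hv
      -- A's resumed scan and B's from-1 scan land on the same suffix K
      obtain ⟨j1, ha1, ha2, ha3⟩ := pvExistsFree used name res.length hlen v (by omega)
      obtain ⟨j2, hb1, hb2, hb3⟩ := pvExistsFree used name used.length (le_refl _) 1 (by omega)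
      have h1 := pvScan_spec used name (res.length + 1) v
        ⟨j1, ha1, by push_cast at ha2 ⊢; omega, ha3⟩
      have h2 := pvScan_spec used name (res.length + 1) 1
        ⟨j2, hb1, by push_cast at hb2 ⊢; omega, hb3⟩
      set K1 := pvScan used name (res.length + 1) v with hK1def
      set K2 := pvScan used name (res.length + 1) 1 with hK2def
      have hvK2 : v ≤ K2 := by
        by_contra hlt
        exact h2.2.1 (hvocc K2 h2.1 (by omega))
      have hK : K1 = K2 := by
        have hle1 : K1 ≤ K2 := by
          by_contra hlt
          exact h2.2.1 (h1.2.2 K2 hvK2 (by omega))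
        have hle2 : K2 ≤ K1 := by
          by_contra hlt
          exact h1.2.1 (h2.2.2 K1 (by omega) (by omega))
        omega
      have hK2bound : K2 < (used.length : Int) + 2 := by
        have hle : K2 ≤ j2 := by
          by_contra hlt
          exact hb3 (h2.2.2 j2 hb1 (by omega))
        omega
      have hwa := pvWhile_eq words used name hcont (res.length + 1) v
      have hch := pvChoose_taken used name K2 hname (by omega) hK2bound h2.2.1
        (fun j a b => h2.2.2 j a b)
      simp only [Bool.true_eq_false, if_false, hgD, hwa, ← hK1def, hK, hch]
      apply ih
      · constructor
        · intro s
          rw [PySem.Dict.mem_keys_insert, PySem.Dict.mem_keys_insert,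
            PySem.Set.mem_add, hkeys s]
          constructor
          · rintro (rfl | rfl | h)
            · exact Or.inl hname
            · exact Or.inr rfl
            · exact Or.inl h
          · rintro (h | rfl)
            · exact Or.inr (Or.inr h)
            · exact Or.inr (Or.inl rfl)
        · intro nm v' hv'
          rw [PySem.Dict.get?_insert] at hv'
          by_cases hnm : nm = name
          · rw [if_pos hnm] at hv'
            injection hv' with hv'
            subst hnm
            refine ⟨by omega, ?_⟩
            intro j hj1 hj2
            rcases lt_or_ge j v with hjv | hjv
            · exact (PySem.Set.mem_add _ _ _).2 (Or.inl (hvocc j hj1 hjv))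
            · rcases lt_or_eq_of_le (show j ≤ K2 by omega) with hjK | hjK
              · exact (PySem.Set.mem_add _ _ _).2 (Or.inl (h2.2.2 j (by omega) hjK))
              · subst hjK
                exact (PySem.Set.mem_add _ _ _).2 (Or.inr rfl)
          · rw [if_neg hnm, PySem.Dict.get?_insert] at hv'
            by_cases hnm2 : nm = pvFmt name K2
            · rw [if_pos hnm2] at hv'
              injection hv' with hv'
              exact ⟨by omega, fun j a b => by omega⟩
            · rw [if_neg hnm2] at hv'
              obtain ⟨hh1, hh2⟩ := hcnt nm v' hv'
              exact ⟨hh1, fun j a b => (PySem.Set.mem_add _ _ _).2 (Or.inl (hh2 j a b))⟩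
      · have hfree : pvFmt name K2 ∉ used := h2.2.1
        have : PySem.Set.add used (pvFmt name K2) = used ++ [pvFmt name K2] := by
          simp [PySem.Set.add]
          intro hmem
          exact absurd hmem hfree
        rw [this]
        simp
        omega

theorem pvMain (names : List String) : getFolderNames names = getFolderNames_alt names := by
  unfold getFolderNames getFolderNames_alt
  apply pvGo_eq
  · constructor
    · intro s; simp [PySem.Dict.keys_empty, PySem.Set.empty]
    · intro nm v h; simp [PySem.Dict.get?_empty] at h
  · simp [PySem.Set.empty]

-- ===== VERDICT (by name: the statement is the Claim_ definition above) =====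
theorem getFolderNames_spec : Claim_equal_getFolderNames := by
  intro names _
  unfold Spec_getFolderNames
  exact pvMain names
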